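-- pv_equiv track=rewrite | github.com/napalm272/district_borders | district_borders.py | polygons_to_graph
-- ===== SOURCE A (Python) =====
-- def polygons_to_graph(polygons):
--     """
--     Construct a graph out of a list of polygons. Each polygon is specified as a
--     list of points in clockwise order.
--     """
--     graph = {}
--
--     # Initialize graph nodes.
--     for poly in polygons:
--         for p in poly:
--             graph[p] = set()
--
--     # Add edges.
--     for poly in polygons:
--         size = len(poly)
--         for i in range(size + 1):
--             a = poly[i % size]
--             b = poly[(i + 1) % size]
--             graph[a].add(b)
--             graph[b].add(a)
--
--     return graph
-- ===== SOURCE B (Python) =====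
-- def polygons_to_graph(polygons):
--     """
--     Construct a graph out of a list of polygons. Each polygon is specified as a
--     list of points in clockwise order.
--     """
--     # Distinct nodes, in first-occurrence order.
--     nodes = list(dict.fromkeys(p for poly in polygons for p in poly))
--
--     # Compute each node's adjacency set independently by scanning all edges.
--     def neighbors(p):
--         s = set()
--         for poly in polygons:
--             for a, b in zip(poly, poly[1:] + poly[:1]):
--                 if a == p:
--                     s.add(b)
--                 if b == p:
--                     s.add(a)
--         return s
--
--     return {p: neighbors(p) for p in nodes}
-- ===== Notes on version B (the rewrite author's own statement) =====
-- stated objective: alternative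
-- what changed: B replaces A's incremental mutation of a dict of sets (init pass plus modular-index edge loop) by a two-stage node-centric algorithm: it first computes the distinct node list via dict.fromkeys, then computes each node's adjacency set independently with a fresh scan of all polygon edges per node.
import Mathlib
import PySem

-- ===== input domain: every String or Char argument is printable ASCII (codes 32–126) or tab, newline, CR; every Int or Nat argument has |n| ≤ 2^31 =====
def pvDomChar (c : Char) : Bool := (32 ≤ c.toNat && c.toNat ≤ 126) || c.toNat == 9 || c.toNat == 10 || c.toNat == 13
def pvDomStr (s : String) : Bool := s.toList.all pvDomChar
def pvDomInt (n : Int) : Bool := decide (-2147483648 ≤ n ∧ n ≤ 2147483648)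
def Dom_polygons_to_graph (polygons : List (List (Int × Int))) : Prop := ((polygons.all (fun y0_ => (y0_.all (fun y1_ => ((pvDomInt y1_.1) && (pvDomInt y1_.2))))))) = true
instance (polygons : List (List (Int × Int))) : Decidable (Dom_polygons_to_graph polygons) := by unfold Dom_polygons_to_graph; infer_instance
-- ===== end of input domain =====

-- B replaces A's incremental dict-of-sets mutation (init pass + modular-index edge loop) by a
-- node-centric two-stage algorithm: distinct node list first, then one independent edge scan per
-- node; objective: alternative (B does more work per node, no speed claim).

-- ===== PORT A =====
-- one iteration of A's inner edge loop: a = poly[i % size], b = poly[(i+1) % size]; graph[a].add(b); graph[b].add(a)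
-- (graph[a] / graph[b] are ported as Dict.modify: exact under Pre_, where every point was initialized)
def pvStepA (poly : List (Int × Int)) (g : PySem.Dict (Int × Int) (PySem.Set (Int × Int))) (i : Int) :
    PySem.Dict (Int × Int) (PySem.Set (Int × Int)) :=
  let size : Int := (poly.length : Int)
  let a := PySem.List.pyGetD poly (PySem.Int.mod i size) (0, 0)
  let b := PySem.List.pyGetD poly (PySem.Int.mod (i + 1) size) (0, 0)
  let g := g.modify a PySem.Set.empty (fun s => PySem.Set.add s b)
  g.modify b PySem.Set.empty (fun s => PySem.Set.add s a)

def polygons_to_graph (polygons : List (List (Int × Int))) : List (Int × Int × List (Int × Int)) :=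
  -- Initialize graph nodes.
  let graph : PySem.Dict (Int × Int) (PySem.Set (Int × Int)) :=
    polygons.foldl (fun g poly => poly.foldl (fun g p => g.insert p PySem.Set.empty) g) PySem.Dict.empty
  -- Add edges.
  let graph := polygons.foldl
    (fun g poly => (PySem.List.pyRange 0 ((poly.length : Int) + 1)).foldl (pvStepA poly) g) graph
  (graph.items).map (fun p => (p.1.1, p.1.2, p.2))

-- ===== PORT B =====
-- zip(poly, poly[1:] + poly[:1])
def pvPairs (poly : List (Int × Int)) : List ((Int × Int) × (Int × Int)) :=
  poly.zip (poly.drop 1 ++ poly.take 1)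

-- body of B's inner edge loop: if a == p: s.add(b); if b == p: s.add(a)
def pvNbrStep (p : Int × Int) (s : PySem.Set (Int × Int)) (e : (Int × Int) × (Int × Int)) :
    PySem.Set (Int × Int) :=
  let s := if e.1 = p then PySem.Set.add s e.2 else s
  if e.2 = p then PySem.Set.add s e.1 else s

-- def neighbors(p): scan every polygon's edge list, starting from an empty set
def pvNeighbors (polygons : List (List (Int × Int))) (p : Int × Int) : PySem.Set (Int × Int) :=
  polygons.foldl (fun s poly => (pvPairs poly).foldl (pvNbrStep p) s) PySem.Set.empty

def polygons_to_graph_alt (polygons : List (List (Int × Int))) : List (Int × Int × List (Int × Int)) :=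
  -- nodes = list(dict.fromkeys(p for poly in polygons for p in poly))
  let nodes := PySem.List.dedup (polygons.flatMap (fun poly => poly))
  -- {p: neighbors(p) for p in nodes}
  nodes.map (fun p => (p.1, p.2, pvNeighbors polygons p))

-- ===== PRECONDITION & SPEC =====
-- Pre_ excludes inputs containing an empty polygon: there A's edge loop evaluates poly[i % 0] and
-- raises ZeroDivisionError (no value is returned).
def Pre_polygons_to_graph (polygons : List (List (Int × Int))) : Prop :=
  ∀ poly ∈ polygons, poly ≠ []
instance (polygons : List (List (Int × Int))) : Decidable (Pre_polygons_to_graph polygons) := by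
  unfold Pre_polygons_to_graph; infer_instance

def pvWitness_polygons_to_graph : (List (List (Int × Int))) := [[(0, 0), (1, 0), (1, 1)], [(1, 1), (2, 2)]]

def Spec_polygons_to_graph (polygons : List (List (Int × Int))) (out : List (Int × Int × List (Int × Int))) : Prop := out = polygons_to_graph_alt polygons
instance (polygons : List (List (Int × Int))) (out : List (Int × Int × List (Int × Int))) : Decidable (Spec_polygons_to_graph polygons out) := by unfold Spec_polygons_to_graph; infer_instance

-- ===== CLAIM (what is proved, stated in full; the proofs are below) =====
def Claim_equal_polygons_to_graph : Prop := ∀ (polygons : List (List (Int × Int))), Dom_polygons_to_graph polygons → Pre_polygons_to_graph polygons → Spec_polygons_to_graph polygons (polygons_to_graph polygons)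

-- ===== LEMMAS AND PROOFS =====

-- flattened point sequence of an edge list
def pvFlat (L : List ((Int × Int) × (Int × Int))) : List (Int × Int) :=
  L.flatMap (fun e => [e.1, e.2])

-- the pair of points A reads at loop index i
def pvPairI (poly : List (Int × Int)) (i : Int) : (Int × Int) × (Int × Int) :=
  (PySem.List.pyGetD poly (PySem.Int.mod i (poly.length : Int)) (0, 0),
   PySem.List.pyGetD poly (PySem.Int.mod (i + 1) (poly.length : Int)) (0, 0))

-- the canonical key list: fold of Set.update over the polygons
def pvK (polys : List (List (Int × Int))) (S : PySem.Set (Int × Int)) : PySem.Set (Int × Int) :=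
  polys.foldl (fun S p => PySem.Set.update S p) S

theorem pvKeys_modify (d : PySem.Dict (Int × Int) (PySem.Set (Int × Int))) (k : Int × Int)
    (d0 : PySem.Set (Int × Int)) (f : PySem.Set (Int × Int) → PySem.Set (Int × Int)) :
    (d.modify k d0 f).keys = PySem.Set.add d.keys k := by
  rw [PySem.Dict.keys_modify, PySem.Set.add_eq_ite]
  by_cases h : d.contains k = true
  · rw [PySem.Dict.keys_insert_of_contains _ _ h]
    simp [(PySem.Dict.contains_iff_mem_keys d k).mp h]
  · rw [PySem.Dict.keys_insert_of_not_contains _ _ (by simpa using h)]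
    have : ¬ k ∈ d.keys := fun hm => h ((PySem.Dict.contains_iff_mem_keys d k).mpr hm)
    simp [this]

theorem pvKeys_stepA (poly : List (Int × Int)) (g : PySem.Dict (Int × Int) (PySem.Set (Int × Int)))
    (i : Int) :
    (pvStepA poly g i).keys
      = PySem.Set.add (PySem.Set.add g.keys (pvPairI poly i).1) (pvPairI poly i).2 := by
  simp only [pvStepA, pvPairI]
  rw [pvKeys_modify, pvKeys_modify]

theorem pvGetD_stepA (poly : List (Int × Int)) (g : PySem.Dict (Int × Int) (PySem.Set (Int × Int)))
    (i : Int) (k : Int × Int) :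
    (pvStepA poly g i).getD k PySem.Set.empty
      = pvNbrStep k (g.getD k PySem.Set.empty) (pvPairI poly i) := by
  simp only [pvStepA, pvPairI, pvNbrStep, PySem.Dict.getD_modify]
  split_ifs <;> subst_vars <;> simp_all

-- generic: keys / adjacency value of a fold of edge steps, for any step reading the pair pr e
theorem pvKeys_fold {sigma : Type} (step : PySem.Dict (Int × Int) (PySem.Set (Int × Int)) → sigma →
      PySem.Dict (Int × Int) (PySem.Set (Int × Int))) (pr : sigma → (Int × Int) × (Int × Int))
    (hk : ∀ g e, (step g e).keys = PySem.Set.add (PySem.Set.add g.keys (pr e).1) (pr e).2)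
    (L : List sigma) (g : PySem.Dict (Int × Int) (PySem.Set (Int × Int))) :
    (L.foldl step g).keys = PySem.Set.update g.keys (pvFlat (L.map pr)) := by
  induction L generalizing g with
  | nil => simp [pvFlat, PySem.Set.update_nil]
  | cons e L ih =>
    simp only [List.foldl_cons, List.map_cons, pvFlat, List.flatMap_cons]
    rw [ih, hk]
    simp [pvFlat, PySem.Set.update_cons]

theorem pvGetD_fold {sigma : Type} (step : PySem.Dict (Int × Int) (PySem.Set (Int × Int)) → sigma →
      PySem.Dict (Int × Int) (PySem.Set (Int × Int))) (pr : sigma → (Int × Int) × (Int × Int))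
    (k : Int × Int)
    (hg : ∀ g e, (step g e).getD k PySem.Set.empty = pvNbrStep k (g.getD k PySem.Set.empty) (pr e))
    (L : List sigma) (g : PySem.Dict (Int × Int) (PySem.Set (Int × Int))) :
    (L.foldl step g).getD k PySem.Set.empty
      = (L.map pr).foldl (pvNbrStep k) (g.getD k PySem.Set.empty) := by
  induction L generalizing g with
  | nil => simp
  | cons e L ih => simp only [List.foldl_cons, List.map_cons]; rw [ih, hg]

-- A's loop index sequence reads exactly the edge list pvPairs poly plus a repeat of its first edge
theorem pvPairs_length (poly : List (Int × Int)) (h : poly ≠ []) :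
    (pvPairs poly).length = poly.length := by
  have : 1 ≤ poly.length := List.length_pos_iff.mpr h
  simp [pvPairs]
  omega

theorem pvRange_map_pairI (poly : List (Int × Int)) (h : poly ≠ []) :
    (PySem.List.pyRange 0 ((poly.length : Int) + 1)).map (pvPairI poly)
      = pvPairs poly ++ [(pvPairs poly).headD ((0, 0), (0, 0))] := by
  have hs : 1 ≤ poly.length := List.length_pos_iff.mpr h
  have hlenp := pvPairs_length poly h
  rw [show ((poly.length : Int) + 1) = ((poly.length + 1 : Nat) : Int) by push_cast; ring,
    PySem.List.pyRange_zero_natCast, List.map_map]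
  have hne : pvPairs poly ≠ [] := by
    intro hnil; rw [← List.length_eq_zero_iff] at hnil; omega
  have hheadgen : ∀ (L : List ((Int × Int) × (Int × Int))) (hl : 0 < L.length),
      L.headD ((0, 0), (0, 0)) = L[0]'hl := by
    intro L hl
    cases L with
    | nil => simp at hl
    | cons a t => simp
  have hhead : (pvPairs poly).headD ((0, 0), (0, 0)) = (pvPairs poly)[0]'(by omega) :=
    hheadgen _ (by omega)
  apply List.ext_getElem
  · simp [hlenp]
  intro i hi1 hi2
  simp only [List.length_map, List.length_range] at hi1
  have hgetI : ∀ (j : Nat) (hj : j < poly.length + 1),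
      ((List.range (poly.length + 1)).map (pvPairI poly ∘ (fun k : Nat => (k : Int))))[j]'(by
        simp; omega)
      = (poly.getD (j % poly.length) (0, 0), poly.getD ((j + 1) % poly.length) (0, 0)) := by
    intro j hj
    simp only [List.getElem_map, List.getElem_range, Function.comp_apply, pvPairI]
    rw [show ((j : Int) + 1) = ((j + 1 : Nat) : Int) by push_cast; ring]
    rw [PySem.Int.mod_natCast, PySem.Int.mod_natCast, PySem.List.pyGetD_natCast,
      PySem.List.pyGetD_natCast]
  have hpair : ∀ j : Nat, (hj : j < poly.length) → (pvPairs poly)[j]'(by omega)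
      = (poly.getD (j % poly.length) (0, 0), poly.getD ((j + 1) % poly.length) (0, 0)) := by
    intro j hj
    have hz : (pvPairs poly)[j]'(by omega)
        = (poly[j]'hj, (poly.drop 1 ++ poly.take 1)[j]'(by
            simp [List.length_append, List.length_take]; omega)) := by
      simp [pvPairs, List.getElem_zip]
    rw [hz]
    have hfst : poly.getD (j % poly.length) (0, 0) = poly[j]'hj := by
      rw [Nat.mod_eq_of_lt hj]; exact List.getD_eq_getElem poly (0,0) hj
    by_cases hlast : j + 1 < poly.length
    · have hsnd : (poly.drop 1 ++ poly.take 1)[j]'(by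
          simp [List.length_append, List.length_take]; omega)
          = poly[j + 1]'hlast := by
        rw [List.getElem_append_left (by simp; omega)]
        simp
      rw [hsnd, hfst, Nat.mod_eq_of_lt hlast, List.getD_eq_getElem poly (0,0) hlast]
    · have hj1 : j + 1 = poly.length := by omega
      have hsnd : (poly.drop 1 ++ poly.take 1)[j]'(by
          simp [List.length_append, List.length_take]; omega)
          = poly[0]'(by omega) := by
        rw [List.getElem_append_right (by simp; omega)]
        simp [List.getElem_take]
        congr 1
        omega
      rw [hsnd, hfst, hj1, Nat.mod_self, List.getD_eq_getElem poly (0,0) (by omega)]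
  by_cases hi : i < poly.length
  · rw [hgetI i (by omega), List.getElem_append_left (by omega), hpair i hi]
  · have hieq : i = poly.length := by omega
    subst hieq
    rw [hgetI poly.length (by omega), List.getElem_append_right (by omega)]
    simp only [hlenp, Nat.sub_self, List.getElem_singleton]
    rw [hhead, hpair 0 (by omega)]
    rw [Nat.mod_self, Nat.zero_mod, Nat.zero_add]
    have hmod : (poly.length + 1) % poly.length = 1 % poly.length := by
      rw [Nat.add_comm, Nat.add_mod_right]
    rw [hmod]

-- membership in a pvNbrStep fold only grows
theorem pvNbrStep_mono (k : Int × Int) (v : PySem.Set (Int × Int)) (e : (Int × Int) × (Int × Int))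
    (x : Int × Int) (hx : x ∈ v) : x ∈ pvNbrStep k v e := by
  simp only [pvNbrStep]
  split_ifs <;> simp [PySem.Set.mem_add, hx]

theorem pvNbrStep_fold_mono (k : Int × Int) (L : List ((Int × Int) × (Int × Int)))
    (v : PySem.Set (Int × Int)) (x : Int × Int) (hx : x ∈ v) :
    x ∈ L.foldl (pvNbrStep k) v := by
  induction L generalizing v with
  | nil => exact hx
  | cons e L ih => exact ih _ (pvNbrStep_mono k v e x hx)

-- re-processing the first edge after the rest of the polygon is a no-op on the value
theorem pvVal_absorb (k : Int × Int) (e : (Int × Int) × (Int × Int))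
    (R : List ((Int × Int) × (Int × Int))) (v : PySem.Set (Int × Int)) :
    ((e :: R) ++ [e]).foldl (pvNbrStep k) v = (e :: R).foldl (pvNbrStep k) v := by
  rw [List.foldl_append]
  have h1 : e.1 = k → e.2 ∈ (e :: R).foldl (pvNbrStep k) v := by
    intro hk
    rw [List.foldl_cons]
    apply pvNbrStep_fold_mono
    simp only [pvNbrStep]
    rw [if_pos hk]
    split_ifs <;> simp [PySem.Set.mem_add]
  have h2 : e.2 = k → e.1 ∈ (e :: R).foldl (pvNbrStep k) v := by
    intro hk
    rw [List.foldl_cons]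
    apply pvNbrStep_fold_mono
    simp only [pvNbrStep]
    rw [if_pos hk]
    simp [PySem.Set.mem_add]
  show pvNbrStep k ((e :: R).foldl (pvNbrStep k) v) e = (e :: R).foldl (pvNbrStep k) v
  generalize hW : (e :: R).foldl (pvNbrStep k) v = W at h1 h2 ⊢
  by_cases ha : e.1 = k <;> by_cases hb : e.2 = k
  · have hm : k ∈ W := hb ▸ h1 ha
    simp [pvNbrStep, ha, hb, PySem.Set.add_of_mem hm]
  · simp [pvNbrStep, ha, hb, PySem.Set.add_of_mem (h1 ha)]
  · simp [pvNbrStep, ha, hb, PySem.Set.add_of_mem (h2 hb)]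
  · simp [pvNbrStep, ha, hb]

-- duplicated points do not change a Set.update
theorem pvUpdate_absorb (S : PySem.Set (Int × Int)) (e : (Int × Int) × (Int × Int))
    (R : List ((Int × Int) × (Int × Int))) :
    PySem.Set.update S (pvFlat ((e :: R) ++ [e])) = PySem.Set.update S (pvFlat (e :: R)) := by
  have hflat : pvFlat ((e :: R) ++ [e]) = pvFlat (e :: R) ++ [e.1, e.2] := by
    simp [pvFlat]
  rw [hflat, PySem.Set.update_append]
  have hm1 : e.1 ∈ PySem.Set.update S (pvFlat (e :: R)) := by
    rw [PySem.Set.mem_update]; right; simp [pvFlat]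
  have hm2 : e.2 ∈ PySem.Set.update S (pvFlat (e :: R)) := by
    rw [PySem.Set.mem_update]; right; simp [pvFlat]
  rw [PySem.Set.update_cons, PySem.Set.update_cons, PySem.Set.update_nil,
    PySem.Set.add_of_mem hm1, PySem.Set.add_of_mem hm2]

-- updating with the flattened edge list of a polygon = updating with the polygon itself
theorem pvUpdate_flat_pairs (S : PySem.Set (Int × Int)) (poly : List (Int × Int)) :
    PySem.Set.update S (pvFlat (pvPairs poly)) = PySem.Set.update S poly := by
  have aux : ∀ (r : List (Int × Int)) (x c : Int × Int) (S : PySem.Set (Int × Int)),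
      PySem.Set.update S (pvFlat ((x :: r).zip (r ++ [c])))
        = PySem.Set.update (PySem.Set.add S x) (r ++ [c]) := by
    intro r
    induction r with
    | nil =>
      intro x c S
      simp [pvFlat, PySem.Set.update_cons]
    | cons y r' ih =>
      intro x c S
      obtain ⟨hh, tt, htt⟩ : ∃ hh tt, r' ++ [c] = hh :: tt := by
        cases r' <;> exact ⟨_, _, rfl⟩
      have hz : (x :: y :: r').zip ((y :: r') ++ [c]) = (x, y) :: (y :: r').zip (r' ++ [c]) := by
        simp
      have hz2 : (y :: r').zip (r' ++ [c]) = (y, hh) :: r'.zip tt := by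
        rw [htt]; simp
      have hflatZ : pvFlat ((y :: r').zip (r' ++ [c])) = y :: hh :: pvFlat (r'.zip tt) := by
        rw [hz2]; simp [pvFlat]
      have hyA : y ∈ PySem.Set.add (PySem.Set.add S x) y := by
        rw [PySem.Set.mem_add]; right; rfl
      have l1 : PySem.Set.update S (pvFlat ((x :: y :: r').zip ((y :: r') ++ [c])))
          = PySem.Set.update (PySem.Set.add (PySem.Set.add S x) y)
              (pvFlat ((y :: r').zip (r' ++ [c]))) := by
        rw [hz]
        have : pvFlat ((x, y) :: (y :: r').zip (r' ++ [c]))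
            = x :: y :: pvFlat ((y :: r').zip (r' ++ [c])) := by simp [pvFlat]
        rw [this, PySem.Set.update_cons, PySem.Set.update_cons]
      have l2 : PySem.Set.update (PySem.Set.add (PySem.Set.add S x) y)
            (pvFlat ((y :: r').zip (r' ++ [c])))
          = PySem.Set.update (PySem.Set.add (PySem.Set.add S x) y)
              (hh :: pvFlat (r'.zip tt)) := by
        rw [hflatZ, PySem.Set.update_cons, PySem.Set.add_of_mem hyA]
      have l3 : PySem.Set.update (PySem.Set.add S x) (pvFlat ((y :: r').zip (r' ++ [c])))
          = PySem.Set.update (PySem.Set.add (PySem.Set.add S x) y)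
              (hh :: pvFlat (r'.zip tt)) := by
        rw [hflatZ, PySem.Set.update_cons]
      rw [l1, l2, ← l3, ih y c (PySem.Set.add S x)]
      have : (y :: r') ++ [c] = y :: (r' ++ [c]) := by simp
      rw [this, PySem.Set.update_cons]
  cases poly with
  | nil => simp [pvPairs, pvFlat]
  | cons x r =>
    have hp : pvPairs (x :: r) = (x :: r).zip (r ++ [x]) := by
      simp [pvPairs]
    rw [hp, aux r x x S, PySem.Set.update_append, PySem.Set.update_cons, PySem.Set.update_nil]
    have hx : x ∈ PySem.Set.update (PySem.Set.add S x) r := by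
      rw [PySem.Set.mem_update]; left; rw [PySem.Set.mem_add]; right; rfl
    rw [PySem.Set.add_of_mem hx, PySem.Set.update_cons]

-- the initialization pass: keys and values
theorem pvInit_keys (polys : List (List (Int × Int)))
    (g : PySem.Dict (Int × Int) (PySem.Set (Int × Int))) :
    (polys.foldl (fun g poly => poly.foldl (fun g p => g.insert p PySem.Set.empty) g) g).keys
      = pvK polys g.keys := by
  induction polys generalizing g with
  | nil => simp [pvK]
  | cons p ps ih =>
    simp only [List.foldl_cons]
    rw [ih]
    have hk : (p.foldl (fun g q => g.insert q PySem.Set.empty) g).keys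
        = PySem.Set.update g.keys p := by
      simpa using PySem.Dict.keys_foldl_insert p (fun _ _ => PySem.Set.empty) g
    rw [hk]
    simp [pvK]

theorem pvInit_getD (polys : List (List (Int × Int)))
    (g : PySem.Dict (Int × Int) (PySem.Set (Int × Int))) (k : Int × Int)
    (hg : g.getD k PySem.Set.empty = PySem.Set.empty) :
    (polys.foldl (fun g poly => poly.foldl (fun g p => g.insert p PySem.Set.empty) g) g).getD k
      PySem.Set.empty = PySem.Set.empty := by
  have hinner : ∀ (poly : List (Int × Int)) (g : PySem.Dict (Int × Int) (PySem.Set (Int × Int))),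
      g.getD k PySem.Set.empty = PySem.Set.empty →
      (poly.foldl (fun g p => g.insert p PySem.Set.empty) g).getD k PySem.Set.empty
        = PySem.Set.empty := by
    intro poly
    induction poly with
    | nil => intro g hg; exact hg
    | cons q qs ih =>
      intro g hg
      simp only [List.foldl_cons]
      apply ih
      rw [PySem.Dict.getD_insert]
      split_ifs <;> [rfl; exact hg]
  induction polys generalizing g with
  | nil => exact hg
  | cons p ps ih =>
    simp only [List.foldl_cons]
    exact ih _ (hinner p g hg)

-- pvK absorbs a second pass
theorem pvK_mem (polys : List (List (Int × Int))) (S : PySem.Set (Int × Int)) (x : Int × Int)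
    (hx : x ∈ S ∨ ∃ p ∈ polys, x ∈ p) : x ∈ pvK polys S := by
  induction polys generalizing S with
  | nil =>
    rcases hx with h | ⟨p, hp, _⟩
    · exact h
    · simp at hp
  | cons p ps ih =>
    simp only [pvK, List.foldl_cons]
    apply ih
    rcases hx with h | ⟨q, hq, hxq⟩
    · left; rw [PySem.Set.mem_update]; left; exact h
    · rcases List.mem_cons.mp hq with rfl | hq'
      · left; rw [PySem.Set.mem_update]; right; exact hxq
      · right; exact ⟨q, hq', hxq⟩

theorem pvK_of_superset (polys : List (List (Int × Int))) (S : PySem.Set (Int × Int))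
    (hS : ∀ p ∈ polys, ∀ x ∈ p, x ∈ S) : pvK polys S = S := by
  induction polys with
  | nil => simp [pvK]
  | cons p ps ih =>
    have hupd : PySem.Set.update S p = S := by
      rw [PySem.Set.update_eq_append_filter]
      have hfil : (PySem.Set.ofList p).filter (fun y => !S.contains y) = [] := by
        apply List.filter_eq_nil_iff.mpr
        intro y hy
        have hyS : y ∈ S := hS p (by simp) y ((PySem.Set.mem_ofList p y).mp hy)
        simp [hyS]
      rw [hfil, List.append_nil]
    simp only [pvK, List.foldl_cons, hupd]
    exact ih (fun q hq => hS q (by simp [hq]))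

theorem pvK_idem (polys : List (List (Int × Int))) :
    pvK polys (pvK polys PySem.Set.empty) = pvK polys PySem.Set.empty := by
  apply pvK_of_superset
  intro p hp x hx
  exact pvK_mem polys PySem.Set.empty x (Or.inr ⟨p, hp, hx⟩)

theorem pvK_nodup (polys : List (List (Int × Int))) (S : PySem.Set (Int × Int))
    (h : S.Nodup) : (pvK polys S).Nodup := by
  induction polys generalizing S with
  | nil => exact h
  | cons p ps ih =>
    simp only [pvK, List.foldl_cons]
    exact ih _ (PySem.Set.nodup_update S p h)

-- B's node list = pvK of the polygons
theorem pvK_eq_dedup_flat (polys : List (List (Int × Int))) :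
    pvK polys PySem.Set.empty = PySem.List.dedup (polys.flatMap (fun poly => poly)) := by
  rw [PySem.List.dedup_eq_ofList]
  have : ∀ (S : PySem.Set (Int × Int)),
      pvK polys S = PySem.Set.update S (polys.flatMap (fun poly => poly)) := by
    induction polys with
    | nil => intro S; simp [pvK, PySem.Set.update_nil]
    | cons p ps ih =>
      intro S
      simp only [pvK, List.foldl_cons, List.flatMap_cons]
      rw [PySem.Set.update_append, ← ih]
      rfl
  rw [this PySem.Set.empty]
  exact PySem.Set.update_nil_left _

-- per-polygon characterizations of A
theorem pvA_poly_keys (poly : List (Int × Int)) (h : poly ≠ [])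
    (g : PySem.Dict (Int × Int) (PySem.Set (Int × Int))) :
    ((PySem.List.pyRange 0 ((poly.length : Int) + 1)).foldl (pvStepA poly) g).keys
      = PySem.Set.update g.keys poly := by
  rw [pvKeys_fold (pvStepA poly) (pvPairI poly) (pvKeys_stepA poly),
    pvRange_map_pairI poly h]
  have hne : pvPairs poly ≠ [] := by
    intro hnil
    have hl := pvPairs_length poly h
    rw [hnil] at hl
    exact h (List.length_eq_zero_iff.mp hl.symm)
  obtain ⟨e, R, hE⟩ := List.exists_cons_of_ne_nil hne
  rw [hE]
  simp only [List.headD_cons]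
  rw [pvUpdate_absorb, ← hE, pvUpdate_flat_pairs]

theorem pvA_poly_getD (poly : List (Int × Int)) (h : poly ≠ [])
    (g : PySem.Dict (Int × Int) (PySem.Set (Int × Int))) (k : Int × Int) :
    ((PySem.List.pyRange 0 ((poly.length : Int) + 1)).foldl (pvStepA poly) g).getD k
        PySem.Set.empty
      = (pvPairs poly).foldl (pvNbrStep k) (g.getD k PySem.Set.empty) := by
  rw [pvGetD_fold (pvStepA poly) (pvPairI poly) k (fun g i => pvGetD_stepA poly g i k),
    pvRange_map_pairI poly h]
  have hne : pvPairs poly ≠ [] := by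
    intro hnil
    have hl := pvPairs_length poly h
    rw [hnil] at hl
    exact h (List.length_eq_zero_iff.mp hl.symm)
  obtain ⟨e, R, hE⟩ := List.exists_cons_of_ne_nil hne
  rw [hE]
  simp only [List.headD_cons]
  rw [pvVal_absorb, ← hE]

-- whole-list characterizations of A's edge phase
theorem pvA_keys_all (polys : List (List (Int × Int))) (hpre : ∀ p ∈ polys, p ≠ [])
    (g : PySem.Dict (Int × Int) (PySem.Set (Int × Int))) :
    (polys.foldl
        (fun g poly => (PySem.List.pyRange 0 ((poly.length : Int) + 1)).foldl (pvStepA poly) g)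
        g).keys = pvK polys g.keys := by
  induction polys generalizing g with
  | nil => simp [pvK]
  | cons p ps ih =>
    simp only [List.foldl_cons]
    rw [ih (fun q hq => hpre q (by simp [hq])), pvA_poly_keys p (hpre p (by simp)) g]
    simp [pvK]

theorem pvA_getD_all (polys : List (List (Int × Int))) (hpre : ∀ p ∈ polys, p ≠ [])
    (g : PySem.Dict (Int × Int) (PySem.Set (Int × Int))) (k : Int × Int) :
    (polys.foldl
        (fun g poly => (PySem.List.pyRange 0 ((poly.length : Int) + 1)).foldl (pvStepA poly) g)
        g).getD k PySem.Set.empty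
      = polys.foldl (fun v p => (pvPairs p).foldl (pvNbrStep k) v) (g.getD k PySem.Set.empty) := by
  induction polys generalizing g with
  | nil => simp
  | cons p ps ih =>
    simp only [List.foldl_cons]
    rw [ih (fun q hq => hpre q (by simp [hq])), pvA_poly_getD p (hpre p (by simp)) g k]

-- ===== VERDICT (by name: the statement is the Claim_ definition above) =====
theorem polygons_to_graph_spec : Claim_equal_polygons_to_graph := by
  intro polys hdom hpre
  unfold Spec_polygons_to_graph polygons_to_graph polygons_to_graph_alt
  show ((polys.foldl
      (fun g poly => (PySem.List.pyRange 0 ((poly.length : Int) + 1)).foldl (pvStepA poly) g)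
      (polys.foldl (fun g poly => poly.foldl (fun g p => g.insert p PySem.Set.empty) g)
        (PySem.Dict.empty : PySem.Dict (Int × Int) (PySem.Set (Int × Int))))).items).map
      (fun p => (p.1.1, p.1.2, p.2))
    = (PySem.List.dedup (polys.flatMap (fun poly => poly))).map
        (fun p => (p.1, p.2, pvNeighbors polys p))
  have hpre' : ∀ p ∈ polys, p ≠ [] := hpre
  have hkeys0 :
      (polys.foldl (fun g poly => poly.foldl (fun g p => g.insert p PySem.Set.empty) g)
        (PySem.Dict.empty : PySem.Dict (Int × Int) (PySem.Set (Int × Int)))).keys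
        = pvK polys PySem.Set.empty := by
    rw [pvInit_keys]
    simp [PySem.Dict.keys_empty]
  have hkeys1 := pvA_keys_all polys hpre'
    (polys.foldl (fun g poly => poly.foldl (fun g p => g.insert p PySem.Set.empty) g)
      (PySem.Dict.empty : PySem.Dict (Int × Int) (PySem.Set (Int × Int))))
  rw [hkeys0, pvK_idem] at hkeys1
  have hgd : ∀ k,
      (polys.foldl
        (fun g poly => (PySem.List.pyRange 0 ((poly.length : Int) + 1)).foldl (pvStepA poly) g)
        (polys.foldl (fun g poly => poly.foldl (fun g p => g.insert p PySem.Set.empty) g)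
          (PySem.Dict.empty : PySem.Dict (Int × Int) (PySem.Set (Int × Int))))).getD k PySem.Set.empty
      = pvNeighbors polys k := by
    intro k
    rw [pvA_getD_all polys hpre',
      pvInit_getD polys (PySem.Dict.empty : PySem.Dict (Int × Int) (PySem.Set (Int × Int))) k
        (PySem.Dict.getD_empty k PySem.Set.empty)]
    rfl
  have hnd : (pvK polys PySem.Set.empty).Nodup := pvK_nodup polys PySem.Set.empty List.nodup_nil
  rw [PySem.Dict.items_eq_map_keys _ (by rw [hkeys1]; exact hnd) PySem.Set.empty,
    List.map_map, hkeys1, pvK_eq_dedup_flat]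
  exact List.map_congr_left (fun k _ => by
    simp only [Function.comp_apply]
    rw [hgd k])
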